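-- pv_equiv track=rewrite | github.com/koyeonwoo9380/programmers | 푸드 파이트 대회.py | solution
-- ===== SOURCE A (Python) =====
-- def solution(food):
--     answer = ''
--     for i in range(1, len(food)):
--         number = int(food[i]) // 2 # 1
--         answer += str(i) * number   # 'i'로 하면 i를 number 번 반복한다. str(i) =i에 해당하는 숫자 해야한다.
--     answer += '0'
--     # 역으로 반복
--     for i in range(len(food)-1, 0, -1):  # 역순은 +1이라 0이다
--         number = int(food[i]) // 2
--         answer += str(i) * number
--     return answer
-- ===== SOURCE B (Python) =====
-- def solution(food):
--     # build the palindrome from the inside out: start at the centre '0' and,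
--     # going from the highest food index down to 1, wrap the current result
--     # with that index's segment on both ends
--     res = ['0']
--     for i in range(len(food) - 1, 0, -1):
--         seg = str(i) * (food[i] // 2)
--         res.insert(0, seg)
--         res.append(seg)
--     return ''.join(res)
-- ===== Notes on version B (the rewrite author's own statement) =====
-- stated objective: alternative
-- what changed: B builds the palindrome from the inside out with a single backward loop that wraps the current result with each index's segment on both ends (maintaining a palindrome invariant throughout), instead of A's two sequential index loops emitting left half, centre, then right half.
import Mathlib
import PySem

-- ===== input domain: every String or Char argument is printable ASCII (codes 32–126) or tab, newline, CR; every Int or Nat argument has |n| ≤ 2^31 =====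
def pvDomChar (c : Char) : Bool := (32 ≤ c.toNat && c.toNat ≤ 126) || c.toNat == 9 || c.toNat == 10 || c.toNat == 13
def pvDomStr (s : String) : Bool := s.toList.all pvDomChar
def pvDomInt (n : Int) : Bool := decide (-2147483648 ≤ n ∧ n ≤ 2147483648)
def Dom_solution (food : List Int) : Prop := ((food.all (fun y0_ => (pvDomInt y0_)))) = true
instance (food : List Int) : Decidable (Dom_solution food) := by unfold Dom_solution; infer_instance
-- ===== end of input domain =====

-- B builds the palindrome by recursive nesting seg(i) ++ inner ++ seg(i) instead of A's two index loops; objective: alternative decomposition.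

-- ===== PORT A =====
-- answer += str(i) * (int(food[i]) // 2), forward loop, '0', then reverse loop
def solution (food : List Int) : String :=
  let n : Int := PySem.List.len food
  let answer : List Char :=
    (PySem.List.pyRange 1 n 1).foldl (fun acc i =>
      acc ++ PySem.List.pyRepeat (PySem.Int.toChars i)
              (PySem.Int.floordiv (PySem.List.pyGetD food i 0) 2)) []
  let answer := answer ++ ['0']
  let answer :=
    (PySem.List.pyRange (n - 1) 0 (-1)).foldl (fun acc i =>
      acc ++ PySem.List.pyRepeat (PySem.Int.toChars i)
              (PySem.Int.floordiv (PySem.List.pyGetD food i 0) 2)) answer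
  String.ofList answer

-- ===== PORT B =====
-- res = ['0']; for i in range(len(food)-1, 0, -1): seg = str(i)*(food[i]//2); res.insert(0, seg); res.append(seg); ''.join(res)
def solution_alt (food : List Int) : String :=
  let res : List (List Char) :=
    (PySem.List.pyRange (PySem.List.len food - 1) 0 (-1)).foldl (fun res i =>
      let seg := PySem.List.pyRepeat (PySem.Int.toChars i)
                   (PySem.Int.floordiv (PySem.List.pyGetD food i 0) 2)
      [seg] ++ res ++ [seg]) [['0']]
  String.ofList res.flatten

-- ===== PRECONDITION & SPEC =====
def Spec_solution (food : List Int) (out : String) : Prop := out = solution_alt food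
instance (food : List Int) (out : String) : Decidable (Spec_solution food out) := by unfold Spec_solution; infer_instance

-- ===== CLAIM (what is proved, stated in full; the proofs are below) =====
def Claim_equal_solution : Prop := ∀ (food : List Int), Dom_solution food → Spec_solution food (solution food)

-- ===== LEMMAS AND PROOFS =====

-- wrapping invariant: folding the countdown range wraps res with the segments 1..k on both sides
theorem wrap_foldl_eq (food : List Int) (k : Nat) (res : List (List Char)) :
    (PySem.List.pyRange (k : Int) 0 (-1)).foldl (fun res i =>
        [PySem.List.pyRepeat (PySem.Int.toChars i) (PySem.Int.floordiv (PySem.List.pyGetD food i 0) 2)]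
          ++ res
          ++ [PySem.List.pyRepeat (PySem.Int.toChars i) (PySem.Int.floordiv (PySem.List.pyGetD food i 0) 2)]) res
      = ((PySem.List.pyRange 1 ((k : Int) + 1) 1).map (fun i =>
            PySem.List.pyRepeat (PySem.Int.toChars i) (PySem.Int.floordiv (PySem.List.pyGetD food i 0) 2)))
        ++ res
        ++ ((PySem.List.pyRange 1 ((k : Int) + 1) 1).map (fun i =>
            PySem.List.pyRepeat (PySem.Int.toChars i) (PySem.Int.floordiv (PySem.List.pyGetD food i 0) 2))).reverse := by
  induction k generalizing res with
  | zero =>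
      have h1 : PySem.List.pyRange ((0 : Nat) : Int) 0 (-1) = [] :=
        PySem.List.pyRange_neg_one_eq_nil (by norm_num)
      have h2 : PySem.List.pyRange 1 (((0 : Nat) : Int) + 1) 1 = [] :=
        PySem.List.pyRange_one_eq_nil (by norm_num)
      rw [h1, h2]; simp
  | succ k ih =>
      have h1 : (0 : Int) < ((k + 1 : Nat) : Int) := by omega
      rw [PySem.List.pyRange_neg_one_cons h1]
      have hc : ((k + 1 : Nat) : Int) - 1 = (k : Int) := by push_cast; ring
      have hr : PySem.List.pyRange 1 (((k + 1 : Nat) : Int) + 1) 1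
          = PySem.List.pyRange 1 ((k : Int) + 1) 1 ++ [((k + 1 : Nat) : Int)] := by
        have := PySem.List.pyRange_one_succ_right (a := 1) (b := (k : Int) + 1) (by omega)
        push_cast at this ⊢
        simpa using this
      simp only [List.foldl_cons, hc, ih, hr]
      simp

-- ===== VERDICT (by name: the statement is the Claim_ definition above) =====
theorem solution_spec : Claim_equal_solution := by
  intro food _
  unfold Spec_solution solution solution_alt
  have hrev : PySem.List.pyRange ((food.length : Int) - 1) 0 (-1)
      = (PySem.List.pyRange 1 (food.length : Int) 1).reverse := by
    have := PySem.List.pyRange_neg_one_eq_reverse ((food.length : Int) - 1) 0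
    simpa using this
  rcases Nat.eq_zero_or_pos food.length with h0 | hpos
  · simp [PySem.List.len_eq, h0, PySem.List.pyRange_one_eq_nil, PySem.List.pyRange_neg_one_eq_nil]
  · have hk : ((food.length : Int)) - 1 = ((food.length - 1 : Nat) : Int) := by omega
    have hinv := wrap_foldl_eq food (food.length - 1) [['0']]
    have hk1 : ((food.length - 1 : Nat) : Int) + 1 = (food.length : Int) := by omega
    rw [hk1] at hinv
    simp only [PySem.List.len_eq]
    have hrev' : PySem.List.pyRange (((food.length - 1 : Nat) : Int)) 0 (-1)
        = (PySem.List.pyRange 1 (food.length : Int) 1).reverse := by rw [← hk]; exact hrev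
    rw [hk, hinv, hrev']
    simp only [PySem.List.foldl_append_eq_flatMap, List.flatMap_def, List.map_reverse,
      List.nil_append, List.append_assoc, List.singleton_append]
    simp
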